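-- pv_equiv track=rewrite | github.com/rlafeldt/garmin-data | src/biointelligence/garmin/models.py | _extract_body_battery
-- ===== SOURCE A (Python) =====
-- def _extract_body_battery(bb_data: list | None) -> tuple[int | None, int | None, int | None]:
--     """Extract morning, max, and min body battery from the body battery list.
--
--     The first reading is taken as the morning value. Max and min are computed
--     across all readings.
--     """
--     if not bb_data or not isinstance(bb_data, list):
--         return None, None, None
--
--     levels = [
--         entry.get("bodyBatteryLevel")
--         for entry in bb_data
--         if isinstance(entry, dict) and entry.get("bodyBatteryLevel") is not None
--     ]
--     if not levels:
--         return None, None, None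
--
--     return levels[0], max(levels), min(levels)
-- ===== SOURCE B (Python) =====
-- def _extract_body_battery(bb_data):
--     """Single pass over bb_data maintaining morning/max/min accumulators."""
--     if not bb_data or not isinstance(bb_data, list):
--         return None, None, None
--
--     morning = mx = mn = None
--     for entry in bb_data:
--         if not isinstance(entry, dict):
--             continue
--         v = entry.get("bodyBatteryLevel")
--         if v is None:
--             continue
--         if morning is None:
--             morning = mx = mn = v
--         else:
--             if v > mx:
--                 mx = v
--             if v < mn:
--                 mn = v
--     return morning, mx, mn
-- ===== Notes on version B (the rewrite author's own statement) =====
-- stated objective: simpler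
-- what changed: Replaced the intermediate levels list plus three separate passes (indexing, max(), min()) with one loop over bb_data that maintains morning/max/min accumulators directly, never materialising the list.
import Mathlib
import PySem

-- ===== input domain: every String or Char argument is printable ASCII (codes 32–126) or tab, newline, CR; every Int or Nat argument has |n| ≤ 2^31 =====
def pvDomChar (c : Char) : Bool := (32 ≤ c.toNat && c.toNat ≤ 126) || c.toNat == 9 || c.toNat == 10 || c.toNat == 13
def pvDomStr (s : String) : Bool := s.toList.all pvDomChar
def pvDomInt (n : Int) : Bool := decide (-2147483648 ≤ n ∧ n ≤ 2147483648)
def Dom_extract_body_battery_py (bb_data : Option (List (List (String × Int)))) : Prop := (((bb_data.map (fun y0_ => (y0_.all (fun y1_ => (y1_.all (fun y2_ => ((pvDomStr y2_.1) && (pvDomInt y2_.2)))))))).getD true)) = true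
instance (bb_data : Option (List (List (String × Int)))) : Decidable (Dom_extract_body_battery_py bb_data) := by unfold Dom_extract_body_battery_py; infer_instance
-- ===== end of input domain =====

-- B replaces the levels-list comprehension plus three separate passes (levels[0], max, min)
-- with one loop maintaining morning/max/min accumulators (objective: simpler).


-- ===== PORT A =====
-- levels = [entry.get("bodyBatteryLevel") for entry in bb_data if … is not None]
def extract_body_battery_py (bb_data : Option (List (List (String × Int)))) : Option Int × Option Int × Option Int :=
  match bb_data with
  | none => (none, none, none)                 -- not bb_data (None)
  | some bb =>
    if bb = [] then (none, none, none)         -- not bb_data (empty list)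
    else
      let levels := bb.filterMap (fun entry => PySem.Dict.get? (PySem.Dict.mk entry) "bodyBatteryLevel")
      if levels = [] then (none, none, none)
      else (PySem.List.pyGet? levels 0,        -- levels[0]
            PySem.List.max? levels (fun x => x),
            PySem.List.min? levels (fun x => x))

-- ===== PORT B =====
-- the for-loop of Source B: state (morning, mx, mn)
def bbLoop (entries : List (List (String × Int))) (morning mx mn : Option Int) :
    Option Int × Option Int × Option Int :=
  match entries with
  | [] => (morning, mx, mn)
  | entry :: rest =>
    match PySem.Dict.get? (PySem.Dict.mk entry) "bodyBatteryLevel" with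
    | none => bbLoop rest morning mx mn                        -- v is None: continue
    | some v =>
      match morning with
      | none => bbLoop rest (some v) (some v) (some v)         -- first accepted value
      | some _ =>
        bbLoop rest morning
          (mx.map (fun a => if v > a then v else a))           -- if v > mx: mx = v
          (mn.map (fun b => if v < b then v else b))           -- if v < mn: mn = v

def extract_body_battery_py_alt (bb_data : Option (List (List (String × Int)))) : Option Int × Option Int × Option Int :=
  match bb_data with
  | none => (none, none, none)
  | some bb =>
    if bb = [] then (none, none, none)
    else bbLoop bb none none none

-- ===== PRECONDITION & SPEC =====
def Spec_extract_body_battery_py (bb_data : Option (List (List (String × Int)))) (out : Option Int × Option Int × Option Int) : Prop := out = extract_body_battery_py_alt bb_data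
instance (bb_data : Option (List (List (String × Int)))) (out : Option Int × Option Int × Option Int) : Decidable (Spec_extract_body_battery_py bb_data out) := by unfold Spec_extract_body_battery_py; infer_instance

-- ===== CLAIM (what is proved, stated in full; the proofs are below) =====
def Claim_equal_extract_body_battery_py : Prop := ∀ (bb_data : Option (List (List (String × Int)))), Dom_extract_body_battery_py bb_data → Spec_extract_body_battery_py bb_data (extract_body_battery_py bb_data)

-- ===== LEMMAS AND PROOFS =====

-- after the first accepted value the loop is a running max/min over the remaining levels
theorem bbLoop_some (es : List (List (String × Int))) (m a b : Int) :
    bbLoop es (some m) (some a) (some b) =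
      (some m,
       some ((es.filterMap (fun e => PySem.Dict.get? (PySem.Dict.mk e) "bodyBatteryLevel")).foldl max a),
       some ((es.filterMap (fun e => PySem.Dict.get? (PySem.Dict.mk e) "bodyBatteryLevel")).foldl min b)) := by
  induction es generalizing a b with
  | nil => simp [bbLoop]
  | cons e rest ih =>
    simp only [bbLoop, List.filterMap_cons]
    cases h : PySem.Dict.get? (PySem.Dict.mk e) "bodyBatteryLevel" with
    | none => simp [ih]
    | some v =>
      simp only [Option.map_some, List.foldl_cons]
      have hmax : (if v > a then v else a) = max a v := by
        rcases le_total v a with h' | h' <;> simp [max_def] <;> omega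
      have hmin : (if v < b then v else b) = min b v := by
        rcases le_total v b with h' | h' <;> simp [min_def] <;> omega
      rw [hmax, hmin, ih]

theorem bbLoop_none (es : List (List (String × Int))) :
    bbLoop es none none none =
      match es.filterMap (fun e => PySem.Dict.get? (PySem.Dict.mk e) "bodyBatteryLevel") with
      | [] => (none, none, none)
      | h :: t => (some h, some (t.foldl max h), some (t.foldl min h)) := by
  induction es with
  | nil => simp [bbLoop]
  | cons e rest ih =>
    simp only [bbLoop, List.filterMap_cons]
    cases h : PySem.Dict.get? (PySem.Dict.mk e) "bodyBatteryLevel" with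
    | none => simpa using ih
    | some v => simp [bbLoop_some]

-- ===== VERDICT (by name: the statement is the Claim_ definition above) =====
theorem extract_body_battery_py_spec : Claim_equal_extract_body_battery_py := by
  intro bb_data _
  unfold Spec_extract_body_battery_py extract_body_battery_py extract_body_battery_py_alt
  cases bb_data with
  | none => rfl
  | some bb =>
    by_cases hbb : bb = []
    · simp [hbb]
    · simp only [if_neg hbb]
      rw [bbLoop_none]
      cases hL : bb.filterMap (fun e => PySem.Dict.get? (PySem.Dict.mk e) "bodyBatteryLevel") with
      | nil => simp
      | cons h t =>
        simp [PySem.List.pyGet?, PySem.List.pyIdx?,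
          PySem.List.max?_id_cons, PySem.List.min?_id_cons]
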